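-- pv_equiv track=rewrite | github.com/tobi/qmd | finetune-mlx/eval.py | score_expansion
-- ===== SOURCE A (Python) =====
-- def score_expansion(text: str) -> dict:
--     """Score an expansion based on format and quality."""
--     scores = {
--         "has_lex": 0,
--         "has_vec": 0,
--         "has_hyde": 0,
--         "lex_count": 0,
--         "vec_count": 0,
--         "format_valid": 0,
--         "total": 0,
--     }
--
--     lines = text.strip().split("\n")
--
--     for line in lines:
--         line = line.strip()
--         if line.startswith("lex:"):
--             scores["has_lex"] = 1
--             scores["lex_count"] += 1
--         elif line.startswith("vec:"):
--             scores["has_vec"] = 1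
--             scores["vec_count"] += 1
--         elif line.startswith("hyde:"):
--             scores["has_hyde"] = 1
--
--     # Format is valid if we have at least one of each type
--     if scores["has_lex"] and scores["has_vec"] and scores["has_hyde"]:
--         scores["format_valid"] = 1
--
--     # Total score (0-100)
--     scores["total"] = (
--         scores["format_valid"] * 40 +
--         min(scores["lex_count"], 3) * 10 +
--         min(scores["vec_count"], 3) * 10 +
--         scores["has_hyde"] * 20
--     )
--
--     return scores
-- ===== SOURCE B (Python) =====
-- def score_expansion(text: str) -> dict:
--     """Score an expansion: three independent scans over the stripped lines."""
--     lines = [ln.strip() for ln in text.strip().split("\n")]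
--     lex_count = sum(1 for ln in lines if ln.startswith("lex:"))
--     vec_count = sum(1 for ln in lines if ln.startswith("vec:"))
--     has_hyde = 1 if any(ln.startswith("hyde:") for ln in lines) else 0
--     has_lex = 1 if lex_count > 0 else 0
--     has_vec = 1 if vec_count > 0 else 0
--     format_valid = 1 if (has_lex and has_vec and has_hyde) else 0
--     total = (format_valid * 40 + min(lex_count, 3) * 10
--              + min(vec_count, 3) * 10 + has_hyde * 20)
--     return {
--         "has_lex": has_lex,
--         "has_vec": has_vec,
--         "has_hyde": has_hyde,
--         "lex_count": lex_count,
--         "vec_count": vec_count,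
--         "format_valid": format_valid,
--         "total": total,
--     }
-- ===== Notes on version B (the rewrite author's own statement) =====
-- stated objective: alternative
-- what changed: Replaces the single if/elif stateful loop over lines with independent per-category passes (countP for lex:, countP for vec:, any for hyde:) over the stripped lines, deriving the flags from the counts and lifting the scoring formula out; correct because the three prefixes are mutually exclusive.
import Mathlib
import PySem

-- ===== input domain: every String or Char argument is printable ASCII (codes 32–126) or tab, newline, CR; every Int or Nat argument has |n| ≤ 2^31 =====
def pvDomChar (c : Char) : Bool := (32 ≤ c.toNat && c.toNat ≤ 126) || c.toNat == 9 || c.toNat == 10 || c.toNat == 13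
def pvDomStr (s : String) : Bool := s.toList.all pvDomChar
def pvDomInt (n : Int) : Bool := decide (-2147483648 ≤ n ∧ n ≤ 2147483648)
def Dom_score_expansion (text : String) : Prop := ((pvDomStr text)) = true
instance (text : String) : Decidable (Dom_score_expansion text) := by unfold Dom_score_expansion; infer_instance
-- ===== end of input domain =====

-- B is an alternative decomposition: independent per-category scans instead of A's single if/elif stateful loop.

-- ===== PORT A =====
-- the dict's mutable fields, in order: (has_lex, has_vec, has_hyde, lex_count, vec_count)
def scoreLineA (s : Int × Int × Int × Int × Int) (line : List Char) : Int × Int × Int × Int × Int :=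
  let line := PySem.Chars.strip line
  if PySem.Chars.startswith line ['l', 'e', 'x', ':'] then
    (1, s.2.1, s.2.2.1, s.2.2.2.1 + 1, s.2.2.2.2)
  else if PySem.Chars.startswith line ['v', 'e', 'c', ':'] then
    (s.1, 1, s.2.2.1, s.2.2.2.1, s.2.2.2.2 + 1)
  else if PySem.Chars.startswith line ['h', 'y', 'd', 'e', ':'] then
    (s.1, s.2.1, 1, s.2.2.2.1, s.2.2.2.2)
  else s

def score_expansion (text : String) : List (String × Int) :=
  let lines := PySem.Chars.splitOn (PySem.Chars.strip text.toList) ['\n']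
  let s := lines.foldl scoreLineA (0, 0, 0, 0, 0)
  let format_valid : Int := if s.1 ≠ 0 ∧ s.2.1 ≠ 0 ∧ s.2.2.1 ≠ 0 then 1 else 0
  let total : Int := format_valid * 40 + min s.2.2.2.1 3 * 10 + min s.2.2.2.2 3 * 10 + s.2.2.1 * 20
  [("has_lex", s.1), ("has_vec", s.2.1), ("has_hyde", s.2.2.1),
   ("lex_count", s.2.2.2.1), ("vec_count", s.2.2.2.2),
   ("format_valid", format_valid), ("total", total)]

-- ===== PORT B =====
def score_expansion_alt (text : String) : List (String × Int) :=
  let lines := (PySem.Chars.splitOn (PySem.Chars.strip text.toList) ['\n']).map PySem.Chars.strip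
  let lex_count : Int := lines.countP (fun ln => PySem.Chars.startswith ln ['l', 'e', 'x', ':'])
  let vec_count : Int := lines.countP (fun ln => PySem.Chars.startswith ln ['v', 'e', 'c', ':'])
  let has_hyde : Int := if lines.any (fun ln => PySem.Chars.startswith ln ['h', 'y', 'd', 'e', ':']) then 1 else 0
  let has_lex : Int := if lex_count > 0 then 1 else 0
  let has_vec : Int := if vec_count > 0 then 1 else 0
  let format_valid : Int := if has_lex ≠ 0 ∧ has_vec ≠ 0 ∧ has_hyde ≠ 0 then 1 else 0
  let total : Int := format_valid * 40 + min lex_count 3 * 10 + min vec_count 3 * 10 + has_hyde * 20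
  [("has_lex", has_lex), ("has_vec", has_vec), ("has_hyde", has_hyde),
   ("lex_count", lex_count), ("vec_count", vec_count),
   ("format_valid", format_valid), ("total", total)]

-- ===== PRECONDITION & SPEC =====
def Spec_score_expansion (text : String) (out : List (String × Int)) : Prop := out = score_expansion_alt text
instance (text : String) (out : List (String × Int)) : Decidable (Spec_score_expansion text out) := by unfold Spec_score_expansion; infer_instance

-- ===== CLAIM (what is proved, stated in full; the proofs are below) =====
def Claim_equal_score_expansion : Prop := ∀ (text : String), Dom_score_expansion text → Spec_score_expansion text (score_expansion text)

-- ===== LEMMAS AND PROOFS =====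

-- the three prefixes are mutually exclusive
theorem startswith_excl (p q x : List Char)
    (hp : PySem.Chars.startswith x p = true)
    (hnpq : ¬ p <+: q) (hnqp : ¬ q <+: p) :
    PySem.Chars.startswith x q = false := by
  cases hq : PySem.Chars.startswith x q with
  | false => rfl
  | true =>
    rw [PySem.Chars.startswith_iff] at hp hq
    rcases List.prefix_or_prefix_of_prefix hp hq with h | h
    · exact (hnpq h).elim
    · exact (hnqp h).elim

-- closed form of A's loop from an arbitrary start state
theorem foldl_scoreLineA (l : List (List Char)) (a b c d e : Int) :
    l.foldl scoreLineA (a, b, c, d, e) =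
      ((if (l.map PySem.Chars.strip).any (fun x => PySem.Chars.startswith x ['l', 'e', 'x', ':']) then 1 else a),
       (if (l.map PySem.Chars.strip).any (fun x => PySem.Chars.startswith x ['v', 'e', 'c', ':']) then 1 else b),
       (if (l.map PySem.Chars.strip).any (fun x => PySem.Chars.startswith x ['h', 'y', 'd', 'e', ':']) then 1 else c),
       d + ((l.map PySem.Chars.strip).countP (fun x => PySem.Chars.startswith x ['l', 'e', 'x', ':']) : Int),
       e + ((l.map PySem.Chars.strip).countP (fun x => PySem.Chars.startswith x ['v', 'e', 'c', ':']) : Int)) := by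
  induction l generalizing a b c d e with
  | nil => simp
  | cons x t ih =>
    simp only [List.foldl_cons, List.map_cons, List.any_cons, List.countP_cons, scoreLineA]
    rcases Bool.eq_false_or_eq_true (PySem.Chars.startswith (PySem.Chars.strip x) ['l', 'e', 'x', ':']) with hl | hl
    ·
      have hv := startswith_excl ['l', 'e', 'x', ':'] ['v', 'e', 'c', ':'] _ hl (by decide) (by decide)
      have hh := startswith_excl ['l', 'e', 'x', ':'] ['h', 'y', 'd', 'e', ':'] _ hl (by decide) (by decide)
      simp [hl, hv, hh, ih]
      try push_cast
      try omega
    · rcases Bool.eq_false_or_eq_true (PySem.Chars.startswith (PySem.Chars.strip x) ['v', 'e', 'c', ':']) with hv | hv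
      ·
        have hh := startswith_excl ['v', 'e', 'c', ':'] ['h', 'y', 'd', 'e', ':'] _ hv (by decide) (by decide)
        simp [hl, hv, hh, ih]
        try push_cast
        try omega
      · rcases Bool.eq_false_or_eq_true (PySem.Chars.startswith (PySem.Chars.strip x) ['h', 'y', 'd', 'e', ':']) with hh | hh
        ·
          simp [hl, hv, hh, ih]
          try push_cast
          try omega
        · simp [hl, hv, hh, ih]
          try push_cast
          try omega

theorem any_iff_countP_pos {α : Type} (p : α → Bool) (l : List α) :
    ((if l.any p then (1 : Int) else 0)) = (if ((l.countP p : Int)) > 0 then 1 else 0) := by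
  rcases Bool.eq_false_or_eq_true (l.any p) with h | h
  · obtain ⟨x, hx, hpx⟩ := List.any_eq_true.mp h
    have hc : ((l.countP p : Int)) > 0 := by
      exact_mod_cast List.countP_pos_iff.mpr ⟨x, hx, hpx⟩
    rw [h, if_pos rfl, if_pos hc]
  · have h0 : l.countP p = 0 := by
      rw [List.countP_eq_zero]
      intro x hx
      simpa using List.any_eq_false.mp h x hx
    simp [h, h0]

-- ===== VERDICT (by name: the statement is the Claim_ definition above) =====
theorem score_expansion_spec : Claim_equal_score_expansion := by
  intro text _
  unfold Spec_score_expansion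
  simp only [score_expansion, score_expansion_alt, foldl_scoreLineA, zero_add, any_iff_countP_pos]
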